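-- pv_equiv track=rewrite | github.com/stoneeve415/LintCode | _1671_play_game.py | playGames
-- ===== SOURCE A (Python) =====
-- def playGames(A):
--     _max = max(A)
--     left, right = 0, _max*2
--     while left < right:
--         mid = (left+right) // 2
--         cnt = 0
--         for item in A:
--             cnt += max(mid-item, 0)
--         if mid > cnt:
--             left = mid + 1
--         else:
--             right = mid
--     return max(left, _max)
-- ===== SOURCE B (Python) =====
-- def _bisect_left(s, x):
--     # leftmost index where x could be inserted to keep s sorted
--     lo, hi = 0, len(s)
--     while lo < hi:
--         m = (lo + hi) // 2
--         if s[m] < x: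
--             lo = m + 1
--         else:
--             hi = m
--     return lo
--
--
-- def playGames(A):
--     s = sorted(A)
--     prefix = [0]
--     run = 0
--     for x in s:
--         run += x
--         prefix.append(run)
--     mx = s[-1]
--     left, right = 0, 2 * mx
--     while left < right:
--         mid = (left + right) // 2
--         k = _bisect_left(s, mid)
--         cnt = mid * k - prefix[k]
--         if mid > cnt:
--             left = mid + 1
--         else:
--             right = mid
--     return max(left, mx)
-- ===== Notes on version B (the rewrite author's own statement) =====
-- stated objective: faster
-- what changed: The O(n) inner rescan of A at every binary-search step is replaced by sorting A once, building a prefix-sum array, and computing each step's deficit count as mid*k - prefix[k] with k found by a hand-written bisect, so each step costs O(log n) instead of O(n).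
import Mathlib
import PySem

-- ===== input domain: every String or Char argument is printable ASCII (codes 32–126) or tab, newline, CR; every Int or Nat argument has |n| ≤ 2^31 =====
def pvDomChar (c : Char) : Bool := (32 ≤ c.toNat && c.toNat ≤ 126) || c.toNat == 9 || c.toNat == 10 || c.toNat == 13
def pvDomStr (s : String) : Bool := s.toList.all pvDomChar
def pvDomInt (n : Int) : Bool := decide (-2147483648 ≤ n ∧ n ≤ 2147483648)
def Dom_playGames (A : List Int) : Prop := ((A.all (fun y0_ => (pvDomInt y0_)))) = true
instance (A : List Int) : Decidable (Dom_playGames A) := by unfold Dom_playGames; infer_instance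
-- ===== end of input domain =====

-- B replaces A's O(n) rescan per binary-search step by a sorted array + prefix sums,
-- answering each step with a bisect; equivalence of return values is proved on nonempty lists
-- (on [] both Pythons raise).

-- ===== PORT A =====

-- cnt = 0; for item in A: cnt += max(mid-item, 0)
def pgCntA (A : List Int) (mid : Int) : Int :=
  A.foldl (fun cnt item => cnt + max (mid - item) 0) 0

-- the while loop of A; fuel = (right-left).toNat suffices since the gap shrinks each step
def pgLoopA (A : List Int) : Nat → Int → Int → Int
  | 0, left, _ => left
  | fuel + 1, left, right =>
    if left < right then
      let mid := PySem.Int.floordiv (left + right) 2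
      let cnt := pgCntA A mid
      if mid > cnt then pgLoopA A fuel (mid + 1) right
      else pgLoopA A fuel left mid
    else left

def playGames (A : List Int) : Int :=
  match PySem.List.max? A (fun x => x) with
  | none => 0   -- Python: max([]) raises ValueError; excluded by Pre_
  | some mx =>
    let left : Int := 0
    let right : Int := mx * 2
    let res := pgLoopA A ((right - left).toNat) left right
    max res mx

-- ===== PORT B =====

-- hand-written bisect_left from Source B (indices are nonnegative Python ints → Nat)
def pgBisect (s : List Int) (x : Int) : Nat → Nat → Nat → Nat
  | 0, lo, _ => lo
  | fuel + 1, lo, hi =>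
    if lo < hi then
      let m := (lo + hi) / 2
      if s.getD m 0 < x then pgBisect s x fuel (m + 1) hi
      else pgBisect s x fuel lo m
    else lo

-- prefix = [0]; run = 0; for x in s: run += x; prefix.append(run)
def pgPrefix (s : List Int) : List Int :=
  (s.foldl (fun (st : List Int × Int) x => (st.1 ++ [st.2 + x], st.2 + x)) ([0], 0)).1

def pgCntB (s pre : List Int) (mid : Int) : Int :=
  let k := pgBisect s mid s.length 0 s.length
  mid * (k : Int) - pre.getD k 0

def pgLoopB (s pre : List Int) : Nat → Int → Int → Int
  | 0, left, _ => left
  | fuel + 1, left, right =>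
    if left < right then
      let mid := PySem.Int.floordiv (left + right) 2
      let cnt := pgCntB s pre mid
      if mid > cnt then pgLoopB s pre fuel (mid + 1) right
      else pgLoopB s pre fuel left mid
    else left

def playGames_alt (A : List Int) : Int :=
  let s := PySem.List.sorted A (fun x => x) false
  let pre := pgPrefix s
  match s.getLast? with
  | none => 0   -- Python: s[-1] raises IndexError on []; excluded by Pre_
  | some mx =>
    let left : Int := 0
    let right : Int := 2 * mx
    let res := pgLoopB s pre ((right - left).toNat) left right
    max res mx

-- ===== PRECONDITION & SPEC =====
-- Pre_ excludes only the empty list, on which both Pythons raise (ValueError / IndexError).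
def Pre_playGames (A : List Int) : Prop := A ≠ []
instance (A : List Int) : Decidable (Pre_playGames A) := by unfold Pre_playGames; infer_instance
def pvWitness_playGames : List Int := [3, 1, 2]

def Spec_playGames (A : List Int) (out : Int) : Prop := out = playGames_alt A
instance (A : List Int) (out : Int) : Decidable (Spec_playGames A out) := by unfold Spec_playGames; infer_instance

-- ===== CLAIM (what is proved, stated in full; the proofs are below) =====
def Claim_equal_playGames : Prop := ∀ (A : List Int), Dom_playGames A → Pre_playGames A → Spec_playGames A (playGames A)

-- ===== LEMMAS AND PROOFS =====

-- characterisation of the prefix-sum fold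
def pgPsums (r : Int) : List Int → List Int
  | [] => []
  | x :: xs => (r + x) :: pgPsums (r + x) xs

theorem pgPrefix_fold (s : List Int) (p : List Int) (r : Int) :
    s.foldl (fun (st : List Int × Int) x => (st.1 ++ [st.2 + x], st.2 + x)) (p, r)
      = (p ++ pgPsums r s, r + s.sum) := by
  induction s generalizing p r with
  | nil => simp [pgPsums]
  | cons x xs ih => simp [pgPsums, ih, List.append_assoc]; ring

theorem pgPsums_getD (s : List Int) (r : Int) (k : Nat) (hk : k < s.length) :
    (pgPsums r s).getD k 0 = r + (s.take (k + 1)).sum := by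
  induction s generalizing r k with
  | nil => simp at hk
  | cons x xs ih =>
    cases k with
    | zero => simp [pgPsums]
    | succ j =>
      simp only [pgPsums, List.getD_cons_succ, List.take_succ_cons, List.sum_cons]
      rw [ih (r + x) j (by simpa using hk)]; ring

theorem pgPrefix_getD (s : List Int) (k : Nat) (hk : k ≤ s.length) :
    (pgPrefix s).getD k 0 = (s.take k).sum := by
  unfold pgPrefix
  rw [pgPrefix_fold]
  cases k with
  | zero => simp
  | succ j =>
    have hj : j < s.length := by omega
    simp only [List.singleton_append, List.getD_cons_succ]
    simpa using pgPsums_getD s 0 j hj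

-- sortedness facts
theorem pg_sorted_pairwise (A : List Int) :
    (PySem.List.sorted A (fun x => x) false).Pairwise (· ≤ ·) := by
  simpa using PySem.List.sorted_pairwise A (fun x => x)

-- in a sorted list, the elements below x are exactly the takeWhile prefix
theorem pg_getElem_lt_iff (s : List Int) (x : Int) (hs : s.Pairwise (· ≤ ·))
    (m : Nat) (hm : m < s.length) :
    s[m] < x ↔ m < (s.takeWhile (fun a => decide (a < x))).length := by
  constructor
  · intro h
    by_contra hmc
    push Not at hmc
    set c := (s.takeWhile (fun a => decide (a < x))).length with hc
    have hclen : c < s.length := lt_of_le_of_lt hmc hm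
    have hsplit : s.takeWhile (fun a => decide (a < x)) ++ s.dropWhile (fun a => decide (a < x)) = s :=
      List.takeWhile_append_dropWhile
    have hlen : c + (s.dropWhile (fun a => decide (a < x))).length = s.length := by
      have h0 := congrArg List.length hsplit
      simp only [List.length_append] at h0
      exact h0
    have hdne : s.dropWhile (fun a => decide (a < x)) ≠ [] := by
      intro h0; rw [h0] at hlen; simp at hlen; omega
    have hhead : ¬ ((s.dropWhile (fun a => decide (a < x))).head hdne) < x := by
      have h1 := List.head?_dropWhile_not (fun a => decide (a < x)) s
      rw [List.head?_eq_some_head hdne] at h1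
      simpa using h1
    have hgc : s[c]'hclen = (s.dropWhile (fun a => decide (a < x))).head hdne := by
      rw [List.getElem_of_eq hsplit.symm hclen,
        List.getElem_append_right (le_refl c)]
      simp only [← hc, Nat.sub_self]
      exact List.getElem_zero (by omega)
    have hle : s[c]'hclen ≤ s[m] := by
      rcases Nat.lt_or_ge c m with hlt | hge
      · exact List.pairwise_iff_getElem.1 hs c m hclen hm hlt
      · have : c = m := by omega
        subst this; exact le_refl _
    rw [hgc] at hle
    omega
  · intro h
    have hpre := List.takeWhile_prefix (l := s) (fun a => decide (a < x))
    have he : s[m] = (s.takeWhile (fun a => decide (a < x)))[m]'h := by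
      exact (hpre.getElem h).symm
    have hmem : (s.takeWhile (fun a => decide (a < x)))[m]'h ∈ s.takeWhile (fun a => decide (a < x)) :=
      List.getElem_mem h
    have := List.mem_takeWhile_imp hmem
    rw [he]
    simpa using this

-- bisect correctness on a sorted list
theorem pgBisect_correct (s : List Int) (x : Int) (hs : s.Pairwise (· ≤ ·)) :
    ∀ fuel lo hi, lo ≤ (s.takeWhile (fun a => decide (a < x))).length →
      (s.takeWhile (fun a => decide (a < x))).length ≤ hi → hi ≤ s.length → hi - lo ≤ fuel →
      pgBisect s x fuel lo hi = (s.takeWhile (fun a => decide (a < x))).length := by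
  intro fuel
  induction fuel with
  | zero =>
    intro lo hi h1 h2 h3 h4
    simp only [pgBisect]
    omega
  | succ n ih =>
    intro lo hi h1 h2 h3 h4
    by_cases hlh : lo < hi
    · simp only [pgBisect, if_pos hlh]
      have hmlt : (lo + hi) / 2 < hi := by omega
      have hmge : lo ≤ (lo + hi) / 2 := by omega
      have hmlen : (lo + hi) / 2 < s.length := lt_of_lt_of_le hmlt h3
      rw [List.getD_eq_getElem s 0 hmlen]
      by_cases hb : s[(lo + hi) / 2]'hmlen < x
      · rw [if_pos hb]
        have hcm := (pg_getElem_lt_iff s x hs _ hmlen).1 hb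
        exact ih _ _ (by omega) h2 h3 (by omega)
      · rw [if_neg hb]
        have hcm : ¬ (lo + hi) / 2 < (s.takeWhile (fun a => decide (a < x))).length := by
          intro hcm'
          exact hb ((pg_getElem_lt_iff s x hs _ hmlen).2 hcm')
        exact ih _ _ h1 (by omega) (by omega) (by omega)
    · simp only [pgBisect, if_neg hlh]
      omega

-- every element past the takeWhile prefix of a sorted list is ≥ x
theorem pg_dropWhile_ge (s : List Int) (x : Int) (hs : s.Pairwise (· ≤ ·)) :
    ∀ a ∈ s.dropWhile (fun a => decide (a < x)), x ≤ a := by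
  have hpw : (s.dropWhile (fun a => decide (a < x))).Pairwise (· ≤ ·) :=
    hs.sublist (List.dropWhile_suffix _).sublist
  cases hdw : s.dropWhile (fun a => decide (a < x)) with
  | nil => intro a ha; simp at ha
  | cons h t =>
    have hhead : ¬ h < x := by
      have h1 := List.head?_dropWhile_not (fun a => decide (a < x)) s
      rw [hdw] at h1
      simpa using h1
    rw [hdw] at hpw
    intro a ha
    rcases List.mem_cons.1 ha with rfl | hat
    · omega
    · have := (List.pairwise_cons.1 hpw).1 a hat
      omega

theorem pg_sum_map_sub (mid : Int) (t : List Int) :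
    (t.map (fun a => mid - a)).sum = mid * t.length - t.sum := by
  induction t with
  | nil => simp
  | cons y ys ih => simp [ih]; ring

-- the two per-step counts agree
theorem pgCnt_eq (A : List Int) (mid : Int) :
    pgCntA A mid = pgCntB (PySem.List.sorted A (fun x => x) false)
      (pgPrefix (PySem.List.sorted A (fun x => x) false)) mid := by
  set s := PySem.List.sorted A (fun x => x) false with hsdef
  have hs : s.Pairwise (· ≤ ·) := pg_sorted_pairwise A
  set c := (s.takeWhile (fun a => decide (a < mid))).length with hcdef
  have hcle : c ≤ s.length := (List.takeWhile_prefix _).length_le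
  have hk : pgBisect s mid s.length 0 s.length = c :=
    pgBisect_correct s mid hs s.length 0 s.length (Nat.zero_le _) hcle (le_refl _) (by omega)
  have htake : s.take c = s.takeWhile (fun a => decide (a < mid)) :=
    (List.prefix_iff_eq_take.1 (List.takeWhile_prefix _)).symm
  have hpre : (pgPrefix s).getD c 0 = (s.takeWhile (fun a => decide (a < mid))).sum := by
    rw [pgPrefix_getD s c hcle, htake]
  unfold pgCntA pgCntB
  rw [PySem.List.foldl_add (g := fun item => max (mid - item) 0)]
  have hperm : ((s.map (fun a => max (mid - a) 0)).sum : Int)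
      = (A.map (fun a => max (mid - a) 0)).sum :=
    ((PySem.List.sorted_perm A (fun x => x) false).map _).sum_eq
  rw [← hperm]
  conv_lhs => rw [← List.takeWhile_append_dropWhile (p := fun a => decide (a < mid)) (l := s)]
  rw [List.map_append, List.sum_append]
  have h1 : (s.takeWhile (fun a => decide (a < mid))).map (fun a => max (mid - a) 0)
      = (s.takeWhile (fun a => decide (a < mid))).map (fun a => mid - a) := by
    apply List.map_congr_left
    intro a ha
    have := List.mem_takeWhile_imp ha
    simp at this
    omega
  have h2 : ((s.dropWhile (fun a => decide (a < mid))).map (fun a => max (mid - a) 0)).sum = 0 := by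
    have : (s.dropWhile (fun a => decide (a < mid))).map (fun a => max (mid - a) 0)
        = (s.dropWhile (fun a => decide (a < mid))).map (fun _ => (0 : Int)) := by
      apply List.map_congr_left
      intro a ha
      have := pg_dropWhile_ge s mid hs a ha
      omega
    rw [this]
    simp
  rw [h1, h2, pg_sum_map_sub]
  show _ = mid * ((pgBisect s mid s.length 0 s.length : Nat) : Int)
      - (pgPrefix s).getD (pgBisect s mid s.length 0 s.length) 0
  rw [hk, hpre]
  ring

-- loop congruence: same fuel, same bounds, counts agree pointwise
theorem pgLoop_eq (A s pre : List Int)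
    (h : ∀ mid, pgCntA A mid = pgCntB s pre mid) :
    ∀ fuel left right, pgLoopA A fuel left right = pgLoopB s pre fuel left right := by
  intro fuel
  induction fuel with
  | zero => intro l r; rfl
  | succ n ih =>
    intro l r
    simp only [pgLoopA, pgLoopB, h, ih]

-- the two maxima agree
theorem pgMax_eq (A : List Int) (hA : A ≠ []) :
    PySem.List.max? A (fun x => x)
      = (PySem.List.sorted A (fun x => x) false).getLast? := by
  set s := PySem.List.sorted A (fun x => x) false with hsdef
  have hs : s.Pairwise (· ≤ ·) := pg_sorted_pairwise A
  have hsne : s ≠ [] := by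
    intro h0
    exact hA ((PySem.List.sorted_eq_nil_iff A (fun x => x) false).1 h0)
  cases hmax : PySem.List.max? A (fun x => x) with
  | none => exact absurd ((PySem.List.max?_eq_none_iff A (fun x => x)).1 hmax) hA
  | some m =>
    rw [List.getLast?_eq_some_getLast hsne]
    congr 1
    have hglen : 0 < s.length := List.length_pos_iff.2 hsne
    have hgm : s.getLast hsne ∈ A := by
      have := List.getLast_mem hsne
      exact (PySem.List.mem_sorted A (fun x => x) false _).1 this
    have h1 : s.getLast hsne ≤ m := PySem.List.max?_isMax hmax _ hgm
    have h2 : m ≤ s.getLast hsne := by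
      have hmA : m ∈ A := PySem.List.max?_mem hmax
      have hms : m ∈ s := (PySem.List.mem_sorted A (fun x => x) false m).2 hmA
      obtain ⟨i, hi, hie⟩ := List.getElem_of_mem hms
      rw [← hie, List.getLast_eq_getElem hsne]
      rcases Nat.lt_or_ge i (s.length - 1) with hlt | hge
      · exact List.pairwise_iff_getElem.1 hs i (s.length - 1) hi (by omega) hlt
      · have : i = s.length - 1 := by omega
        subst this; exact le_refl _
    omega

-- ===== VERDICT (by name: the statement is the Claim_ definition above) =====
theorem playGames_spec : Claim_equal_playGames := by
  intro A _ hA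
  unfold Spec_playGames playGames playGames_alt
  dsimp only
  rw [pgMax_eq A hA]
  cases hlast : (PySem.List.sorted A (fun x => x) false).getLast? with
  | none => rfl
  | some mx =>
    simp only
    rw [pgLoop_eq A _ _ (fun mid => pgCnt_eq A mid)]
    rw [show mx * 2 = 2 * mx by ring]
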